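-- pv_equiv track=rewrite | github.com/World-In-World/world-in-world | downstream/api_models/se3ds_model.py | split_actions
-- ===== SOURCE A (Python) =====
-- from typing import List
--
-- def split_actions(actions: List[int], max_len: int) -> List[List[int]]:
--     """
--     Split a sequence of action-ids into sub-sequences under two rules.
--     Rule 1: whenever the current value ≠ 1, start a new sublist (the value
--             that triggered the split becomes the first element of the new sublist).
--     Rule 2: a sublist must never grow beyond max_len elements; if adding the
--             next element would exceed max_len, start a new sublist.
--     Parameters
--     ----------
--     actions : List[int]
--         Full sequence of action-ids.
--     max_len : int
--         Maximum allowed length of each sublist (must be ≥ 1).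
--     Returns
--     -------
--     List[List[int]]
--         List of sublists that satisfy both rules.
--     """
--     if max_len < 1:
--         raise ValueError("max_len must be at least 1")
--
--     result: List[List[int]] = []
--     current: List[int] = []
--
--     for val in actions:
--         # --- decide whether to break before adding `val` ---
--         need_split = (
--             val != 1 or                      # rule 1
--             len(current) >= max_len          # rule 2 (would overflow)
--         )
--
--         if need_split and current:
--             result.append(current)
--             current = []
--
--         current.append(val)
--
--     if current:                              # append the tail
--         result.append(current)
--
--     return result
-- ===== SOURCE B (Python) =====
-- from typing import List
--
-- def split_actions(actions: List[int], max_len: int) -> List[List[int]]: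
--     """Two-stage re-implementation: scan with indices to cut the sequence into
--     rule-1 groups (a head followed by its run of 1's), then chunk every group
--     into consecutive pieces of at most max_len."""
--     if max_len < 1:
--         raise ValueError("max_len must be at least 1")
--
--     # stage 1: rule-1 groups — each group is actions[i:j] where j is the end
--     # of the run of 1's following position i
--     groups: List[List[int]] = []
--     i, n = 0, len(actions)
--     while i < n:
--         j = i + 1
--         while j < n and actions[j] == 1:
--             j += 1
--         groups.append(actions[i:j])
--         i = j
--
--     # stage 2: chunk each group into pieces of at most max_len
--     out: List[List[int]] = []
--     for g in groups:
--         while len(g) > max_len: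
--             out.append(g[:max_len])
--             g = g[max_len:]
--         out.append(g)
--     return out
-- ===== Notes on version B (the rewrite author's own statement) =====
-- stated objective: alternative
-- what changed: A's single accumulator loop applying both split rules at once is replaced by a two-stage index-scan: first cut the sequence into rule-1 groups (each a head followed by its run of 1's, found by scanning forward), then chunk every group into consecutive pieces of at most max_len.
import Mathlib
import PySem

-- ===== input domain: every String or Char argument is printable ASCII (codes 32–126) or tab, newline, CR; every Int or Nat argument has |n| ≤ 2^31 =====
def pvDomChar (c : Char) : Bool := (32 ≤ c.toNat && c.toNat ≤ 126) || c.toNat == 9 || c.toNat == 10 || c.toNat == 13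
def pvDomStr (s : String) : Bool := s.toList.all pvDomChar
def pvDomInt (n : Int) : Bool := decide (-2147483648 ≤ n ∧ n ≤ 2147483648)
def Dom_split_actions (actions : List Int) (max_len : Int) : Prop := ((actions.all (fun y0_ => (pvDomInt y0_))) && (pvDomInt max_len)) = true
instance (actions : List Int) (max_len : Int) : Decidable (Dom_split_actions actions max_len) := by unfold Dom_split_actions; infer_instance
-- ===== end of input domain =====

-- B replaces A's single accumulator loop (both rules at once) by a two-stage scan:
-- rule-1 groups (head + its run of 1's) first, then chunking each group to max_len
-- (objective: alternative).

-- ===== PORT A =====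
-- A's loop body: split before v when (v ≠ 1 or current is full) and current nonempty.
def stepA (max_len : Int) (st : List (List Int) × List Int) (v : Int) :
    List (List Int) × List Int :=
  if (v ≠ 1 ∨ (st.2.length : Int) ≥ max_len) ∧ st.2 ≠ [] then
    (st.1 ++ [st.2], [v])
  else
    (st.1, st.2 ++ [v])

def split_actions (actions : List Int) (max_len : Int) : List (List Int) :=
  let st := actions.foldl (stepA max_len) ([], [])
  st.1 ++ (if st.2 ≠ [] then [st.2] else [])

-- ===== PORT B =====
-- B stage 1: each group is the head together with its run of 1's (the inner
-- index scan `while j < n and actions[j] == 1` is the takeWhile/dropWhile pair).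
def groupsB : List Int → List (List Int)
  | [] => []
  | x :: xs =>
      (x :: xs.takeWhile (fun v => v == 1)) :: groupsB (xs.dropWhile (fun v => v == 1))
termination_by l => l.length
decreasing_by
  simp only [List.length_cons, Nat.lt_succ_iff]
  exact List.length_dropWhile_le _ _

-- B stage 2: the while loop peeling max_len-prefixes off one group.
def chunkB (m : Nat) (g : List Int) : List (List Int) :=
  if _h : 1 ≤ m ∧ m < g.length then g.take m :: chunkB m (g.drop m) else [g]
termination_by g.length
decreasing_by simp; omega

def split_actions_alt (actions : List Int) (max_len : Int) : List (List Int) :=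
  (groupsB actions).flatMap (chunkB max_len.toNat)

-- ===== PRECONDITION & SPEC =====
-- Python A raises ValueError when max_len < 1; exactly those inputs are excluded.
def Pre_split_actions (actions : List Int) (max_len : Int) : Prop := 1 ≤ max_len
instance (actions : List Int) (max_len : Int) : Decidable (Pre_split_actions actions max_len) := by
  unfold Pre_split_actions; infer_instance

def pvWitness_split_actions : List Int × Int := ([2, 1, 1, 1, 3, 1], 2)

def Spec_split_actions (actions : List Int) (max_len : Int) (out : List (List Int)) : Prop := out = split_actions_alt actions max_len
instance (actions : List Int) (max_len : Int) (out : List (List Int)) : Decidable (Spec_split_actions actions max_len out) := by unfold Spec_split_actions; infer_instance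

-- ===== CLAIM (what is proved, stated in full; the proofs are below) =====
def Claim_equal_split_actions : Prop := ∀ (actions : List Int) (max_len : Int), Dom_split_actions actions max_len → Pre_split_actions actions max_len → Spec_split_actions actions max_len (split_actions actions max_len)

-- ===== LEMMAS AND PROOFS =====

-- Proof-only middle form: the rule-1 grouping written as a fold (used to bridge
-- A's fold to B's structural recursion; not part of either port).
def stepG (st : List (List Int) × List Int) (v : Int) :
    List (List Int) × List Int :=
  if v ≠ 1 ∧ st.2 ≠ [] then (st.1 ++ [st.2], [v]) else (st.1, st.2 ++ [v])

-- Invariant tying A's loop state to the grouping-fold state: the grouping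
-- accumulator is the already-emitted full chunks `pre` followed by A's
-- accumulator, and A's emitted result is the chunks of finished groups ++ pre.
def RelAB (m : Int) (a b : List (List Int) × List Int) : Prop :=
  ∃ pre : List (List Int),
    b.2 = pre.flatten ++ a.2 ∧
    (∀ p ∈ pre, (p.length : Int) = m) ∧
    ((a.2.length : Int) ≤ m) ∧
    (a.2 = [] → pre = [] ∧ b.2 = []) ∧
    a.1 = b.1.flatMap (chunkB m.toNat) ++ pre

lemma chunkB_decomp (m : Nat) (pre : List (List Int)) (cur : List Int)
    (hm : 1 ≤ m) (hpre : ∀ p ∈ pre, p.length = m)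
    (hcur0 : cur ≠ []) (hcur : cur.length ≤ m) :
    chunkB m (pre.flatten ++ cur) = pre ++ [cur] := by
  induction pre with
  | nil =>
    simp only [List.flatten_nil, List.nil_append]
    rw [chunkB]
    have : ¬ (1 ≤ m ∧ m < cur.length) := by omega
    simp [this]
  | cons p ps ih =>
    have hp : p.length = m := hpre p (by simp)
    have hlen : 0 < cur.length := List.length_pos_iff.mpr hcur0
    rw [chunkB]
    have hcond : 1 ≤ m ∧ m < ((p :: ps).flatten ++ cur).length := by
      constructor
      · exact hm
      · simp [hp]; omega
    rw [dif_pos hcond]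
    have harr : (p :: ps).flatten ++ cur = p ++ (ps.flatten ++ cur) := by simp
    rw [harr]
    rw [List.take_append_of_le_length (by omega), List.drop_append_of_le_length (by omega)]
    rw [List.take_of_length_le (by omega), List.drop_eq_nil_of_le (by omega), List.nil_append]
    rw [ih (fun q hq => hpre q (by simp [hq]))]
    simp

lemma rel_step (m : Int) (hm : 1 ≤ m) (a b : List (List Int) × List Int) (v : Int)
    (h : RelAB m a b) : RelAB m (stepA m a v) (stepG b v) := by
  obtain ⟨pre, hb2, hpre, hlen, hemp, hres⟩ := h
  have hmn : m.toNat = m := Int.toNat_of_nonneg (by omega)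
  by_cases hcur : a.2 = []
  · obtain ⟨hpre0, hb20⟩ := hemp hcur
    refine ⟨[], ?_, by simp, ?_, ?_, ?_⟩ <;>
      simp [stepA, stepG, hcur, hb20, hpre0, hres]
    omega
  · have hb2ne : b.2 ≠ [] := by
      simp [hb2]; intro h1 h2; exact hcur h2
    by_cases hv : v = 1
    · by_cases hfull : (a.2.length : Int) ≥ m
      · have hA : (v ≠ 1 ∨ (a.2.length : Int) ≥ m) ∧ a.2 ≠ [] := ⟨Or.inr hfull, hcur⟩
        refine ⟨pre ++ [a.2], ?_, ?_, ?_, ?_, ?_⟩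
        · simp [stepA, stepG, hA, hb2, hv, hfull]
        · intro p hp
          rcases List.mem_append.mp hp with h1 | h1
          · exact hpre p h1
          · simp at h1; subst h1; omega
        · simp [stepA, hfull, hcur]; omega
        · simp [stepA, hfull, hcur]
        · simp [stepA, stepG, hfull, hcur, hres, hv]
      · have hA : ¬ ((v ≠ 1 ∨ (a.2.length : Int) ≥ m) ∧ a.2 ≠ []) := by
          simp [hv]; intro h; omega
        refine ⟨pre, ?_, hpre, ?_, ?_, ?_⟩
        · simp [stepA, stepG, hb2, hv, hfull]
        · simp [stepA, hv, hfull]; omega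
        · simp [stepA, stepG, hv, hfull, hcur]
        · simp [stepA, stepG, hres, hv, hfull]
    · have hA : (v ≠ 1 ∨ (a.2.length : Int) ≥ m) ∧ a.2 ≠ [] := ⟨Or.inl hv, hcur⟩
      have hB : v ≠ 1 ∧ b.2 ≠ [] := ⟨hv, hb2ne⟩
      refine ⟨[], ?_, by simp, ?_, ?_, ?_⟩
      · simp [stepA, stepG, hv, hcur, hb2ne]
      · simp [stepA, hv, hcur]; omega
      · simp [stepA, hv, hcur]
      · simp only [stepA, stepG, if_pos hA, if_pos hB]
        simp only [List.flatMap_append, List.flatMap_cons, List.flatMap_nil,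
          List.append_nil]
        rw [hres, hb2,
          chunkB_decomp m.toNat pre a.2 (by omega)
            (fun p hp => by have := hpre p hp; omega)
            hcur (by omega)]
        simp

lemma rel_fold (m : Int) (hm : 1 ≤ m) (l : List Int)
    (a b : List (List Int) × List Int) (h : RelAB m a b) :
    RelAB m (l.foldl (stepA m) a) (l.foldl stepG b) := by
  induction l generalizing a b with
  | nil => exact h
  | cons v vs ih => exact ih _ _ (rel_step m hm a b v h)

-- The grouping fold, started from a nonempty accumulator, emits exactly the
-- accumulator extended by the run of 1's, then the rule-1 groups of the rest.
lemma groupsB_nil : groupsB [] = [] := by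
  rw [groupsB.eq_def]

lemma groupsB_cons (x : Int) (xs : List Int) :
    groupsB (x :: xs) =
      (x :: xs.takeWhile (fun v => v == 1)) :: groupsB (xs.dropWhile (fun v => v == 1)) := by
  rw [groupsB.eq_def]

lemma fold_stepG (l : List Int) (res : List (List Int)) (cur : List Int)
    (h : cur ≠ []) :
    (l.foldl stepG (res, cur)).1 ++
      (if (l.foldl stepG (res, cur)).2 ≠ [] then [(l.foldl stepG (res, cur)).2] else [])
    = res ++ (cur ++ l.takeWhile (fun v => v == 1)) ::
        groupsB (l.dropWhile (fun v => v == 1)) := by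
  induction l generalizing res cur with
  | nil => simp [h, groupsB_nil]
  | cons v vs ih =>
    by_cases hv : v = 1
    · have hstep : stepG (res, cur) v = (res, cur ++ [v]) := by
        simp [stepG, hv]
      rw [List.foldl_cons, hstep, ih res (cur ++ [v]) (by simp)]
      simp [hv]
    · have hstep : stepG (res, cur) v = (res ++ [cur], [v]) := by
        simp [stepG, hv, h]
      rw [List.foldl_cons, hstep, ih (res ++ [cur]) [v] (by simp)]
      simp [hv, groupsB_cons]

lemma groups_eq (actions : List Int) :
    (actions.foldl stepG ([], [])).1 ++
      (if (actions.foldl stepG ([], [])).2 ≠ [] then [(actions.foldl stepG ([], [])).2] else [])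
    = groupsB actions := by
  cases actions with
  | nil => simp [groupsB_nil]
  | cons x xs =>
    have hstep : stepG ([], []) x = ([], [x]) := by simp [stepG]
    rw [List.foldl_cons, hstep, fold_stepG xs [] [x] (by simp), groupsB_cons]
    simp

-- ===== VERDICT (by name: the statement is the Claim_ definition above) =====
theorem split_actions_spec : Claim_equal_split_actions := by
  intro actions m _ hm
  replace hm : (1 : Int) ≤ m := hm
  unfold Spec_split_actions
  simp only [split_actions, split_actions_alt]
  have h0 : RelAB m ([], []) ([], []) :=
    ⟨[], by simp, by simp, by simp; omega, by simp, by simp⟩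
  obtain ⟨pre, hb2, hpre, hlen, hemp, hres⟩ :=
    rel_fold m hm actions ([], []) ([], []) h0
  rw [← groups_eq actions]
  set a := actions.foldl (stepA m) ([], [])
  set b := actions.foldl stepG ([], [])
  by_cases hcur : a.2 = []
  · obtain ⟨hpre0, hb20⟩ := hemp hcur
    simp [hcur, hb20, hres, hpre0]
  · have hne : pre.flatten ++ a.2 ≠ [] := by simp [hcur]
    rw [if_pos hcur, hres, hb2, if_pos hne, List.flatMap_append]
    simp only [List.flatMap_cons, List.flatMap_nil, List.append_nil]
    rw [chunkB_decomp m.toNat pre a.2 (by omega)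
          (fun p hp => by have := hpre p hp; omega) hcur (by omega)]
    simp
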